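-- pv_equiv track=rewrite | github.com/CalcagnoLoic/Algo_Data_Plot_ML_Playground | exercises/algorithmic/string.py | first_lowercase
-- ===== SOURCE A (Python) =====
-- def first_lowercase(s):
--     lowercase = []
--     uppercase = []
--
--     for char in s:
--         if char.islower():
--             lowercase.append(char)
--         else:
--             uppercase.append(char)
--
--     return "".join(lowercase + uppercase)
-- ===== SOURCE B (Python) =====
-- def first_lowercase(s):
--     return "".join(sorted(s, key=lambda c: not c.islower()))
-- ===== Notes on version B (the rewrite author's own statement) =====
-- stated objective: idiomatic
-- what changed: Replaced the explicit two-bucket accumulation loop with a single stable sort keyed on whether the character is not lowercase, letting the partition emerge from sort stability.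
import Mathlib
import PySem

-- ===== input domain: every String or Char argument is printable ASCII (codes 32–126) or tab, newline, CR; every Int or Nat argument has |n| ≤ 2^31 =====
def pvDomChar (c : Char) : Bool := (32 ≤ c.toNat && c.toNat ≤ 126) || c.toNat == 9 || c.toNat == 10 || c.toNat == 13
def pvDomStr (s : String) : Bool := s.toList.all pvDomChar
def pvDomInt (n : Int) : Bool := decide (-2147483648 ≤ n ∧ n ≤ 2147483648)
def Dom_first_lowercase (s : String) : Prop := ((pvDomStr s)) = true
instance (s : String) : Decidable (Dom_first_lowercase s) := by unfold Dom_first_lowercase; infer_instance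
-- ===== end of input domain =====

-- B replaces A's explicit two-bucket loop by one stable sort keyed on "not islower" (idiomatic rewrite).


-- ===== PORT A =====
-- one pass over the characters, appending each to one of two buckets, then join
def first_lowercase (s : String) : String :=
  let st := s.toList.foldl
    (fun (acc : List Char × List Char) c =>
      if PySem.Chars.islower c then (acc.1 ++ [c], acc.2) else (acc.1, acc.2 ++ [c]))
    ([], [])
  String.ofList (st.1 ++ st.2)

-- ===== PORT B =====
-- sorted(s, key=lambda c: not c.islower()); Python bools order as false < true = Lean's Bool order
def first_lowercase_alt (s : String) : String :=
  String.ofList (PySem.List.sorted s.toList (fun c => !(PySem.Chars.islower c)) false)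

-- ===== PRECONDITION & SPEC =====
def Spec_first_lowercase (s : String) (out : String) : Prop := out = first_lowercase_alt s
instance (s : String) (out : String) : Decidable (Spec_first_lowercase s out) := by unfold Spec_first_lowercase; infer_instance

-- ===== CLAIM (what is proved, stated in full; the proofs are below) =====
def Claim_equal_first_lowercase : Prop := ∀ (s : String), Dom_first_lowercase s → Spec_first_lowercase s (first_lowercase s)

-- ===== LEMMAS AND PROOFS =====

-- the comparison used by the sort in B
def pvBefore (a b : Char) : Bool := decide ((!(PySem.Chars.islower a)) < (!(PySem.Chars.islower b)))

theorem pvBefore_eq (a b : Char) :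
    pvBefore a b = (PySem.Chars.islower a && !(PySem.Chars.islower b)) := by
  unfold pvBefore
  cases h1 : PySem.Chars.islower a <;> cases h2 : PySem.Chars.islower b <;> simp

-- inserting a lowercase char into low ++ high lands at the end of low
theorem insertBy_lower (c : Char) (low high : List Char)
    (hc : PySem.Chars.islower c = true)
    (hl : ∀ x ∈ low, PySem.Chars.islower x = true)
    (hh : ∀ x ∈ high, PySem.Chars.islower x = false) :
    PySem.List.insertBy pvBefore c (low ++ high) = (low ++ [c]) ++ high := by
  induction low with
  | nil =>
    cases high with
    | nil => simp [PySem.List.insertBy]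
    | cons y ys =>
      have hy : PySem.Chars.islower y = false := hh y (by simp)
      simp [PySem.List.insertBy, pvBefore_eq, hc, hy]
  | cons x xs ih =>
    have hx : PySem.Chars.islower x = true := hl x (by simp)
    have := ih (fun z hz => hl z (by simp [hz])) 
    simp [PySem.List.insertBy, pvBefore_eq, hx, this]

-- inserting a non-lowercase char appends at the very end
theorem insertBy_other (c : Char) (ys : List Char)
    (hc : PySem.Chars.islower c = false) :
    PySem.List.insertBy pvBefore c ys = ys ++ [c] := by
  apply PySem.List.insertBy_of_forall_not_before
  intro y _
  simp [pvBefore_eq, hc]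

-- the sort's foldl over insertBy, started from a partitioned accumulator, keeps it partitioned
theorem foldl_insertBy_partition (cs low high : List Char)
    (hl : ∀ x ∈ low, PySem.Chars.islower x = true)
    (hh : ∀ x ∈ high, PySem.Chars.islower x = false) :
    cs.foldl (fun acc x => PySem.List.insertBy pvBefore x acc) (low ++ high)
      = (low ++ cs.filter (fun c => PySem.Chars.islower c))
        ++ (high ++ cs.filter (fun c => !(PySem.Chars.islower c))) := by
  induction cs generalizing low high with
  | nil => simp
  | cons c cs ih =>
    by_cases hc : PySem.Chars.islower c = true
    · have hl' : ∀ x ∈ low ++ [c], PySem.Chars.islower x = true := by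
        intro x hx
        rcases List.mem_append.1 hx with h | h
        · exact hl x h
        · simp at h; simpa [h] using hc
      rw [List.foldl_cons, insertBy_lower c low high hc hl hh, ih (low ++ [c]) high hl' hh]
      simp [hc]
    · have hc' : PySem.Chars.islower c = false := by simpa using hc
      have hh' : ∀ x ∈ high ++ [c], PySem.Chars.islower x = false := by
        intro x hx
        rcases List.mem_append.1 hx with h | h
        · exact hh x h
        · simp at h; simpa [h] using hc'
      rw [List.foldl_cons]
      have hins : PySem.List.insertBy pvBefore c (low ++ high) = low ++ (high ++ [c]) := by
        rw [insertBy_other c _ hc']; simp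
      rw [hins, ih low (high ++ [c]) hl hh']
      simp [hc']

-- B's sort is exactly the partition
theorem sorted_eq_partition (cs : List Char) :
    PySem.List.sorted cs (fun c => !(PySem.Chars.islower c)) false
      = cs.filter (fun c => PySem.Chars.islower c)
        ++ cs.filter (fun c => !(PySem.Chars.islower c)) := by
  have h := foldl_insertBy_partition cs [] [] (by simp) (by simp)
  simpa [PySem.List.sorted, pvBefore] using h

-- A's two-bucket loop computes the two filters
theorem foldl_buckets (cs : List Char) (low high : List Char) :
    cs.foldl
      (fun (acc : List Char × List Char) c =>
        if PySem.Chars.islower c then (acc.1 ++ [c], acc.2) else (acc.1, acc.2 ++ [c]))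
      (low, high)
      = (low ++ cs.filter (fun c => PySem.Chars.islower c),
         high ++ cs.filter (fun c => !(PySem.Chars.islower c))) := by
  induction cs generalizing low high with
  | nil => simp
  | cons c cs ih =>
    by_cases hc : PySem.Chars.islower c = true
    · simp [List.foldl_cons, hc, ih]
    · have hc' : PySem.Chars.islower c = false := by simpa using hc
      simp [List.foldl_cons, hc', ih]

-- ===== VERDICT (by name: the statement is the Claim_ definition above) =====
theorem first_lowercase_spec : Claim_equal_first_lowercase := by
  intro s _
  unfold Spec_first_lowercase first_lowercase first_lowercase_alt
  rw [sorted_eq_partition, foldl_buckets]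
  simp
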